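-- pv_equiv track=rewrite | github.com/RommelPa/optimizacion-embalses | backend/app/integrations/pso/legacy/XPSOfin_PSO_V12.py | generar_etiquetas
-- ===== SOURCE A (Python) =====
-- def generar_etiquetas(periodo_inicio, n_periodos):
--     """Genera etiquetas HH:MM para cada periodo. periodo_inicio es 0-based."""
--     etiquetas = []
--     for i in range(n_periodos):
--         p = periodo_inicio + i + 1    # +1 porque los periodos se etiquetan al final
--         minutos = p * 30
--         h = (minutos // 60) % 24
--         m = minutos % 60
--         if h == 0 and m == 0:
--             etiquetas.append("24:00")
--         else:
--             etiquetas.append(f"{h:02d}:{m:02d}")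
--     return etiquetas
-- ===== SOURCE B (Python) =====
-- def generar_etiquetas(periodo_inicio, n_periodos):
--     """Genera etiquetas HH:MM para cada periodo. periodo_inicio es 0-based.
--
--     La etiqueta depende solo de (periodo_inicio + i + 1) mod 48: se precomputa
--     una tabla de 48 etiquetas y el bucle principal solo indexa en ella."""
--     tabla = ["24:00"]
--     for r in range(1, 48):
--         tabla.append("%02d:%02d" % ((r * 30) // 60, (r * 30) % 60))
--     return [tabla[(periodo_inicio + i + 1) % 48] for i in range(n_periodos)]
-- ===== Notes on version B (the rewrite author's own statement) =====
-- stated objective: alternative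
-- what changed: Replaces per-element hour/minute arithmetic and branching with a precomputed 48-entry lookup table (one label per 30-minute period of the day) indexed by (periodo_inicio+i+1) mod 48.
import Mathlib
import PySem

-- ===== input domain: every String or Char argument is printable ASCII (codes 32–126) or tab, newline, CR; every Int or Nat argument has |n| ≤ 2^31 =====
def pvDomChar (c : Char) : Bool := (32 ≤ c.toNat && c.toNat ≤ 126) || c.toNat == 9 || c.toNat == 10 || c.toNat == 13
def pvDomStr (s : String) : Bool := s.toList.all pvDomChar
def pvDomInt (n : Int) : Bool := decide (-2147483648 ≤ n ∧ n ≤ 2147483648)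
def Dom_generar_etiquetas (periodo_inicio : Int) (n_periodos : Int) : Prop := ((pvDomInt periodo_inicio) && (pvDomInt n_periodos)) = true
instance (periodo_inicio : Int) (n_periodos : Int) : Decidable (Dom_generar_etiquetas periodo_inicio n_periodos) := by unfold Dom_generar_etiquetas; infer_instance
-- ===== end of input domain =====

-- B replaces per-element hour/minute arithmetic by a precomputed 48-entry label table
-- indexed by (periodo_inicio+i+1) mod 48 (alternative decomposition; same cost).


-- ===== PORT A =====
-- f"{x:02d}" for 0 ≤ x < 100 (the only values reached: h ∈ [0,24), m ∈ {0,30})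
def pvFmt2 (x : Int) : String := if x < 10 then "0" ++ PySem.Int.toStr x else PySem.Int.toStr x

def generar_etiquetas (periodo_inicio : Int) (n_periodos : Int) : List String :=
  (PySem.List.pyRange 0 n_periodos 1).foldl (fun etiquetas i =>
    let p := periodo_inicio + i + 1
    let minutos := p * 30
    let h := PySem.Int.mod (PySem.Int.floordiv minutos 60) 24
    let m := PySem.Int.mod minutos 60
    if h = 0 ∧ m = 0 then etiquetas ++ ["24:00"]
    else etiquetas ++ [pvFmt2 h ++ ":" ++ pvFmt2 m]) []

-- ===== PORT B =====
-- the 48-entry table: tabla = ["24:00"]; for r in range(1,48): tabla.append("%02d:%02d" % (...))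
def pvTabla : List String :=
  (PySem.List.pyRange 1 48 1).foldl (fun tabla r =>
    tabla ++ [pvFmt2 (PySem.Int.floordiv (r * 30) 60) ++ ":" ++ pvFmt2 (PySem.Int.mod (r * 30) 60)])
    ["24:00"]

-- tabla[idx] with idx = p % 48 always in range, so the pyGetD default is never used
def generar_etiquetas_alt (periodo_inicio : Int) (n_periodos : Int) : List String :=
  (PySem.List.pyRange 0 n_periodos 1).map (fun i =>
    PySem.List.pyGetD pvTabla (PySem.Int.mod (periodo_inicio + i + 1) 48) "")

-- ===== PRECONDITION & SPEC =====
def Spec_generar_etiquetas (periodo_inicio : Int) (n_periodos : Int) (out : List String) : Prop := out = generar_etiquetas_alt periodo_inicio n_periodos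
instance (periodo_inicio : Int) (n_periodos : Int) (out : List String) : Decidable (Spec_generar_etiquetas periodo_inicio n_periodos out) := by unfold Spec_generar_etiquetas; infer_instance

-- ===== CLAIM (what is proved, stated in full; the proofs are below) =====
def Claim_equal_generar_etiquetas : Prop := ∀ (periodo_inicio : Int) (n_periodos : Int), Dom_generar_etiquetas periodo_inicio n_periodos → Spec_generar_etiquetas periodo_inicio n_periodos (generar_etiquetas periodo_inicio n_periodos)

-- ===== LEMMAS AND PROOFS =====
-- A's loop-body label as a function of p
def pvLabA (p : Int) : String :=
  if PySem.Int.mod (PySem.Int.floordiv (p * 30) 60) 24 = 0 ∧ PySem.Int.mod (p * 30) 60 = 0 then "24:00"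
  else pvFmt2 (PySem.Int.mod (PySem.Int.floordiv (p * 30) 60) 24) ++ ":" ++ pvFmt2 (PySem.Int.mod (p * 30) 60)

lemma pvLabA_eq_tabla (p : Int) : pvLabA p = PySem.List.pyGetD pvTabla (PySem.Int.mod p 48) "" := by
  have h48 : PySem.Int.mod p 48 = p % 48 := PySem.Int.mod_eq_emod_of_pos (by norm_num)
  have hm : PySem.Int.mod (p * 30) 60 = PySem.Int.mod ((p % 48) * 30) 60 := by
    rw [PySem.Int.mod_eq_emod_of_pos (by norm_num : (0:Int) < 60),
        PySem.Int.mod_eq_emod_of_pos (by norm_num : (0:Int) < 60)]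
    omega
  have hh : PySem.Int.mod (PySem.Int.floordiv (p * 30) 60) 24
      = PySem.Int.mod (PySem.Int.floordiv ((p % 48) * 30) 60) 24 := by
    rw [PySem.Int.mod_eq_emod_of_pos (by norm_num : (0:Int) < 24),
        PySem.Int.mod_eq_emod_of_pos (by norm_num : (0:Int) < 24),
        PySem.Int.floordiv_eq_ediv_of_pos (by norm_num : (0:Int) < 60),
        PySem.Int.floordiv_eq_ediv_of_pos (by norm_num : (0:Int) < 60)]
    omega
  rw [h48, pvLabA, hm, hh]
  have h0 : 0 ≤ p % 48 := Int.emod_nonneg p (by norm_num)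
  have h1 : p % 48 < 48 := Int.emod_lt_of_pos p (by norm_num)
  set r := p % 48 with hr
  clear_value r
  interval_cases r <;> decide

lemma pvFoldA (periodo_inicio : Int) (l : List Int) (acc : List String) :
    l.foldl (fun etiquetas i =>
      let p := periodo_inicio + i + 1
      let minutos := p * 30
      let h := PySem.Int.mod (PySem.Int.floordiv minutos 60) 24
      let m := PySem.Int.mod minutos 60
      if h = 0 ∧ m = 0 then etiquetas ++ ["24:00"]
      else etiquetas ++ [pvFmt2 h ++ ":" ++ pvFmt2 m]) acc
    = acc ++ l.map (fun i => PySem.List.pyGetD pvTabla (PySem.Int.mod (periodo_inicio + i + 1) 48) "") := by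
  induction l generalizing acc with
  | nil => simp
  | cons x xs ih =>
    simp only [List.foldl_cons, List.map_cons]
    rw [ih, ← pvLabA_eq_tabla (periodo_inicio + x + 1)]
    unfold pvLabA
    split_ifs <;> simp

-- ===== VERDICT (by name: the statement is the Claim_ definition above) =====
theorem generar_etiquetas_spec : Claim_equal_generar_etiquetas := by
  intro periodo_inicio n_periodos _
  unfold Spec_generar_etiquetas generar_etiquetas generar_etiquetas_alt
  simpa using pvFoldA periodo_inicio (PySem.List.pyRange 0 n_periodos 1) []
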